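-- pv_equiv track=rewrite | github.com/zeze98/Algorithm | 프로그래머스/lv2/17687. ［3차］ n진수 게임/［3차］ n진수 게임.py | solution
-- ===== SOURCE A (Python) =====
-- def convert_notation(n, base):
--     T = "0123456789ABCDEF"
--     q, r = divmod(n, base)
--
--     return convert_notation(q, base) + T[r] if q else T[r]
--
-- def solution(n, t, m, p):
--     answer = ''
--     all_num = ''
--     i = 0
--     while True:
--         if len(all_num) >= t*m:
--             break
--         x = convert_notation(i,n)
--         all_num += x
--         i += 1
--     cnt = 1
--     while len(answer) < t:
--         answer += all_num[(p-1) + (m*(cnt-1))]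
--         cnt += 1
--
--     return answer
-- ===== SOURCE B (Python) =====
-- T = "0123456789ABCDEF"
--
-- def to_digits(x, n):
--     ds = []
--     while True:
--         x, r = divmod(x, n)
--         ds.append(T[r])
--         if x == 0:
--             break
--     ds.reverse()
--     return ds
--
-- def solution(n, t, m, p):
--     if t <= 0:
--         return ''
--     need = (p - 1) + m * (t - 1) + 1   # positions 0..need-1 cover all wanted digits
--     out = []
--     pos = 0
--     i = 0
--     while pos < need:
--         for d in to_digits(i, n):
--             if pos >= p - 1 and (pos - (p - 1)) % m == 0 and pos < need:
--                 out.append(d)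
--             pos += 1
--         i += 1
--     return ''.join(out)
-- ===== Notes on version B (the rewrite author's own statement) =====
-- stated objective: alternative
-- what changed: B fuses A's two phases (build the whole t*m-character base-n string, then index it with stride m) into a single streaming pass that converts each number with an iterative divmod loop (vs A's recursion) and keeps a global position counter, collecting a digit exactly when its position is congruent to p-1 modulo m, stopping at the last needed position p-1+m*(t-1).
-- outside the precondition, e.g. on solution(2, 3, 3, 0): A returns '011', B returns '11'; on solution(-2, 2, 1, 1): A returns '0F', B returns '0F'
import Mathlib
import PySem

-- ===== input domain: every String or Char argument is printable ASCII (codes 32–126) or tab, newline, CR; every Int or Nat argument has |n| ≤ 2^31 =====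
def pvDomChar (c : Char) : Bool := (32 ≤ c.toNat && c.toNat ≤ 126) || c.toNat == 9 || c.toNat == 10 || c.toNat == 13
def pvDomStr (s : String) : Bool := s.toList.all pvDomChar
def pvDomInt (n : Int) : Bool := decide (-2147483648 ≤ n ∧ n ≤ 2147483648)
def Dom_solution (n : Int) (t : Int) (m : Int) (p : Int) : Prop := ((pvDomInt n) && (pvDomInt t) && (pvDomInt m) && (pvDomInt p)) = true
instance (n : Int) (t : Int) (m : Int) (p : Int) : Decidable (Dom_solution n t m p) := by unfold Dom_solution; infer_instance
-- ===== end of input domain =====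

-- B fuses A's two phases (build the full t*m-digit string, then index it with a stride)
-- into one streaming pass with a position counter, converting numbers by an iterative
-- divmod loop instead of A's recursion; objective: alternative (same asymptotic cost).

-- ===== PORT A =====

-- the digit table "0123456789ABCDEF" (both Pythons share this literal); T[r] is pyGetD
def pvT : List Char := ['0','1','2','3','4','5','6','7','8','9','A','B','C','D','E','F']

-- termination helper for the two guarded divmod recursions (cited in decreasing_by)
theorem pvQuotLt (x base : Int) (hb : 2 ≤ base) (hx : 0 ≤ x)
    (hq : PySem.Int.floordiv x base ≠ 0) :
    (PySem.Int.floordiv x base).toNat < x.toNat := by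
  rw [PySem.Int.floordiv_eq_ediv_of_pos (by omega)] at *
  have h0 : 0 ≤ x / base := Int.ediv_nonneg hx (by omega)
  have h1 : x / base < x := by
    rcases lt_or_ge 0 x with h | h
    · rw [Int.ediv_lt_iff_lt_mul (by omega : (0:Int) < base)]; nlinarith
    · have hx0 : x = 0 := le_antisymm h hx
      subst hx0; simp at hq
  omega

-- convert_notation(n, base); the dite guard only makes the recursion total (Pre_ stays inside it)
def pvConv (x base : Int) : List Char :=
  if h : 2 ≤ base ∧ 0 ≤ x then
    if hq : PySem.Int.floordiv x base = 0 then
      [PySem.List.pyGetD pvT (PySem.Int.mod x base) ' ']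
    else
      pvConv (PySem.Int.floordiv x base) base ++ [PySem.List.pyGetD pvT (PySem.Int.mod x base) ' ']
  else []
termination_by x.toNat
decreasing_by exact pvQuotLt x base h.1 h.2 hq

theorem pvConv_length_pos (x base : Int) (hb : 2 ≤ base) (hx : 0 ≤ x) :
    0 < (pvConv x base).length := by
  rw [pvConv, dif_pos ⟨hb, hx⟩]
  split <;> simp

-- first while loop of A: grow all_num with convert_notation(i, n) until len ≥ t*m
def pvBuildA (base tm : Int) (acc : List Char) (i : Int) : List Char :=
  if h : 2 ≤ base ∧ 0 ≤ i then
    if hlt : (acc.length : Int) < tm then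
      pvBuildA base tm (acc ++ pvConv i base) (i + 1)
    else acc
  else acc
termination_by (tm - acc.length).toNat
decreasing_by
  have h1 : 0 < (pvConv i base).length := pvConv_length_pos i base h.1 h.2
  simp only [List.length_append]
  omega

-- second while loop of A: answer += all_num[(p-1) + m*(cnt-1)]
def pvAnsA (all : List Char) (t m p : Int) (answer : List Char) (cnt : Int) : List Char :=
  if h : (answer.length : Int) < t then
    pvAnsA all t m p (answer ++ [PySem.List.pyGetD all ((p - 1) + m * (cnt - 1)) ' ']) (cnt + 1)
  else answer
termination_by (t - answer.length).toNat
decreasing_by simp only [List.length_append, List.length_cons, List.length_nil]; omega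

def solution (n : Int) (t : Int) (m : Int) (p : Int) : String :=
  String.ofList (pvAnsA (pvBuildA n (t * m) [] 0) t m p [] 1)

-- ===== PORT B =====

-- to_digits: iterative divmod loop appending T[r], then reverse (dite guard = totality only)
def pvToDigitsGo (x base : Int) (ds : List Char) : List Char :=
  if h : 2 ≤ base ∧ 0 ≤ x then
    if hq : PySem.Int.floordiv x base = 0 then
      ds ++ [PySem.List.pyGetD pvT (PySem.Int.mod x base) ' ']
    else
      pvToDigitsGo (PySem.Int.floordiv x base) base (ds ++ [PySem.List.pyGetD pvT (PySem.Int.mod x base) ' '])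
  else ds
termination_by x.toNat
decreasing_by exact pvQuotLt x base h.1 h.2 hq

def pvToDigits (x base : Int) : List Char := (pvToDigitsGo x base []).reverse

-- body of B's inner 'for d in to_digits(i, n)' loop: state (out, pos)
def pvStepB (need m p : Int) (s : List Char × Int) (d : Char) : List Char × Int :=
  (if p - 1 ≤ s.2 ∧ PySem.Int.mod (s.2 - (p - 1)) m = 0 ∧ s.2 < need then s.1 ++ [d] else s.1,
   s.2 + 1)

theorem pvStepB_snd (need m p : Int) :
    ∀ (ds : List Char) (o : List Char) (q : Int),
      (ds.foldl (pvStepB need m p) (o, q)).2 = q + ds.length := by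
  intro ds
  induction ds with
  | nil => intro o q; simp
  | cons d ds ih =>
      intro o q
      simp only [List.foldl_cons, pvStepB, ih, List.length_cons]
      push_cast; ring

theorem pvToDigitsGo_eq :
    ∀ (x base : Int) (ds : List Char), 2 ≤ base → 0 ≤ x →
      pvToDigitsGo x base ds = ds ++ (pvConv x base).reverse := by
  intro x base ds hb hx
  have hg : 2 ≤ base ∧ 0 ≤ x := ⟨hb, hx⟩
  by_cases hq : PySem.Int.floordiv x base = 0
  · rw [pvToDigitsGo, pvConv, dif_pos hg, dif_pos hg, dif_pos hq, dif_pos hq]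
    simp
  · rw [pvToDigitsGo, pvConv, dif_pos hg, dif_pos hg, dif_neg hq, dif_neg hq]
    have hq0 : 0 ≤ PySem.Int.floordiv x base := by
      rw [PySem.Int.floordiv_eq_ediv_of_pos (by omega)]
      exact Int.ediv_nonneg hx (by omega)
    rw [pvToDigitsGo_eq (PySem.Int.floordiv x base) base _ hb hq0]
    simp [List.append_assoc]
termination_by x _ _ => x.toNat
decreasing_by exact pvQuotLt x base ‹2 ≤ base› ‹0 ≤ x› ‹¬PySem.Int.floordiv x base = 0›

theorem pvToDigits_eq (x base : Int) (hb : 2 ≤ base) (hx : 0 ≤ x) :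
    pvToDigits x base = pvConv x base := by
  unfold pvToDigits
  rw [pvToDigitsGo_eq x base [] hb hx]
  simp

theorem pvToDigits_length_pos (x base : Int) (hb : 2 ≤ base) (hx : 0 ≤ x) :
    0 < (pvToDigits x base).length := by
  rw [pvToDigits_eq x base hb hx]
  exact pvConv_length_pos x base hb hx

-- B's single streaming while loop: global position counter pos, collect matching positions
def pvLoopB (base need m p : Int) (out : List Char) (pos : Int) (i : Int) : List Char :=
  if h : 2 ≤ base ∧ 0 ≤ i then
    if hlt : pos < need then
      pvLoopB base need m p
        ((pvToDigits i base).foldl (pvStepB need m p) (out, pos)).1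
        ((pvToDigits i base).foldl (pvStepB need m p) (out, pos)).2
        (i + 1)
    else out
  else out
termination_by (need - pos).toNat
decreasing_by
  rw [pvStepB_snd]
  have h1 : 0 < (pvToDigits i base).length := pvToDigits_length_pos i base h.1 h.2
  omega

def solution_alt (n : Int) (t : Int) (m : Int) (p : Int) : String :=
  if t ≤ 0 then "" else
  String.ofList (pvLoopB n ((p - 1) + m * (t - 1) + 1) m p [] 0 0)

-- ===== PRECONDITION & SPEC =====
-- Pre_ admits the problem's stated domain (base 2 ≤ n ≤ 16, player 1 ≤ p ≤ m; any t) plus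
-- the degenerate region t ≤ 0 on which A returns '' whenever it does not raise; outside Pre_
-- Python A raises (ZeroDivisionError / RecursionError / IndexError) or returns accidental
-- values through negative-index wraparound into T / all_num.
def Pre_solution (n : Int) (t : Int) (m : Int) (p : Int) : Prop :=
  (2 ≤ n ∧ n ≤ 16 ∧ 1 ≤ p ∧ p ≤ m) ∨ (t ≤ 0 ∧ (0 ≤ m ∨ (2 ≤ n ∧ n ≤ 16)))
instance (n : Int) (t : Int) (m : Int) (p : Int) : Decidable (Pre_solution n t m p) := by
  unfold Pre_solution; infer_instance

def pvWitness_solution : Int × Int × Int × Int := (2, 4, 2, 1)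

def Spec_solution (n : Int) (t : Int) (m : Int) (p : Int) (out : String) : Prop := out = solution_alt n t m p
instance (n : Int) (t : Int) (m : Int) (p : Int) (out : String) : Decidable (Spec_solution n t m p out) := by unfold Spec_solution; infer_instance

-- ===== CLAIM (what is proved, stated in full; the proofs are below) =====
def Claim_equal_solution : Prop := ∀ (n : Int) (t : Int) (m : Int) (p : Int), Dom_solution n t m p → Pre_solution n t m p → Spec_solution n t m p (solution n t m p)

-- ===== LEMMAS AND PROOFS =====

-- the infinite digit stream, truncated after the numbers 0, …, I-1
def pvCat (base : Int) (I : Nat) : List Char :=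
  (List.range I).flatMap (fun j => pvConv (j : Int) base)

theorem pvCat_succ (base : Int) (I : Nat) :
    pvCat base (I + 1) = pvCat base I ++ pvConv (I : Int) base := by
  simp [pvCat, List.range_succ]

theorem pvCat_prefix (base : Int) {a b : Nat} (h : a ≤ b) :
    pvCat base a <+: pvCat base b := by
  induction b, h using Nat.le_induction with
  | base => exact List.prefix_refl _
  | succ b hb ih => rw [pvCat_succ]; exact ih.trans (List.prefix_append _ _)

-- A's first loop computes a truncation of the stream of length ≥ t*m
theorem pvBuildA_spec (base tm : Int) (hb : 2 ≤ base) (I : Nat) :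
    ∃ J : Nat, pvBuildA base tm (pvCat base I) (I : Int) = pvCat base J ∧
      tm ≤ ((pvCat base J).length : Int) := by
  rw [pvBuildA, dif_pos ⟨hb, Int.natCast_nonneg I⟩]
  by_cases hlt : ((pvCat base I).length : Int) < tm
  · rw [dif_pos hlt, ← pvCat_succ]
    have hcast : (I : Int) + 1 = ((I + 1 : Nat) : Int) := by push_cast; ring
    rw [hcast]
    exact pvBuildA_spec base tm hb (I + 1)
  · rw [dif_neg hlt]
    exact ⟨I, rfl, by omega⟩
termination_by (tm - (pvCat base I).length).toNat
decreasing_by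
  have h1 : 0 < (pvConv (I : Int) base).length :=
    pvConv_length_pos _ base hb (Int.natCast_nonneg I)
  rw [pvCat_succ]
  simp only [List.length_append]
  omega

-- A's second loop, as a map over the target indices (p-1) + m*k
theorem pvAnsA_spec (all : List Char) (t m p : Int) (answer : List Char) (cnt : Int)
    (hc : cnt - 1 = (answer.length : Int)) :
    pvAnsA all t m p answer cnt =
      answer ++ (PySem.List.pyRange (cnt - 1) t 1).map
        (fun k => PySem.List.pyGetD all ((p - 1) + m * k) ' ') := by
  rw [pvAnsA]
  by_cases h : (answer.length : Int) < t
  · rw [dif_pos h]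
    have hc' : cnt + 1 - 1 =
        ((answer ++ [PySem.List.pyGetD all ((p - 1) + m * (cnt - 1)) ' ']).length : Int) := by
      simp only [List.length_append, List.length_cons, List.length_nil]
      push_cast
      omega
    rw [pvAnsA_spec all t m p _ (cnt + 1) hc']
    rw [PySem.List.pyRange_one_cons (by omega : cnt - 1 < t)]
    have h2 : cnt + 1 - 1 = (cnt - 1) + 1 := by ring
    rw [h2]
    simp [List.append_assoc]
  · rw [dif_neg h, PySem.List.pyRange_one_eq_nil (by omega)]
    simp
termination_by (t - answer.length).toNat
decreasing_by simp only [List.length_append, List.length_cons, List.length_nil]; omega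

-- the digits B selects from a chunk of the stream starting at absolute position pos
def pvSel (p m need : Int) : List Char → Int → List Char
  | [], _ => []
  | c :: cs, pos =>
      (if p - 1 ≤ pos ∧ PySem.Int.mod (pos - (p - 1)) m = 0 ∧ pos < need then [c] else []) ++
        pvSel p m need cs (pos + 1)

theorem pvFoldl_step (need m p : Int) :
    ∀ (ds : List Char) (o : List Char) (q : Int),
      ds.foldl (pvStepB need m p) (o, q) = (o ++ pvSel p m need ds q, q + ds.length) := by
  intro ds
  induction ds with
  | nil => intro o q; simp [pvSel]
  | cons d cs ih =>
      intro o q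
      simp only [List.foldl_cons, pvStepB, pvSel, ih, List.length_cons]
      refine Prod.ext ?_ ?_
      · simp only []
        split_ifs with hcond <;> simp
      · simp only []
        push_cast; ring

theorem pvSel_append (p m need : Int) :
    ∀ (A B : List Char) (pos : Int),
      pvSel p m need (A ++ B) pos = pvSel p m need A pos ++ pvSel p m need B (pos + A.length) := by
  intro A
  induction A with
  | nil => intro B pos; simp [pvSel]
  | cons c cs ih =>
      intro B pos
      simp only [List.cons_append, pvSel, ih, List.length_cons, List.append_assoc]
      have h2 : pos + 1 + (cs.length : Int) = pos + ((cs.length : Int) + 1) := by ring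
      rw [h2]
      push_cast
      ring_nf

-- B's loop computes the selection from a truncation of the stream of length ≥ need
theorem pvLoopB_spec (base need m p : Int) (hb : 2 ≤ base) (I : Nat) :
    ∃ J : Nat,
      pvLoopB base need m p (pvSel p m need (pvCat base I) 0)
          ((pvCat base I).length : Int) (I : Int) =
        pvSel p m need (pvCat base J) 0 ∧
      need ≤ ((pvCat base J).length : Int) := by
  have hg : 2 ≤ base ∧ 0 ≤ (I : Int) := ⟨hb, Int.natCast_nonneg I⟩
  rw [pvLoopB, dif_pos hg]
  by_cases hlt : ((pvCat base I).length : Int) < need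
  · rw [dif_pos hlt]
    rw [pvToDigits_eq _ base hb (Int.natCast_nonneg I), pvFoldl_step]
    have hfst : pvSel p m need (pvCat base I) 0 ++
        pvSel p m need (pvConv (I : Int) base) (0 + ((pvCat base I).length : Int)) =
        pvSel p m need (pvCat base (I + 1)) 0 := by
      rw [pvCat_succ, pvSel_append]
    have hzero : (0 : Int) + ((pvCat base I).length : Int) = ((pvCat base I).length : Int) := by
      ring
    rw [hzero] at hfst
    have hsnd : ((pvCat base I).length : Int) + ((pvConv (I : Int) base).length : Int) =
        ((pvCat base (I + 1)).length : Int) := by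
      rw [pvCat_succ]; push_cast [List.length_append]; ring
    simp only []
    rw [hfst, hsnd]
    have hcast : (I : Int) + 1 = ((I + 1 : Nat) : Int) := by push_cast; ring
    rw [hcast]
    exact pvLoopB_spec base need m p hb (I + 1)
  · rw [dif_neg hlt]
    exact ⟨I, rfl, by omega⟩
termination_by (need - (pvCat base I).length).toNat
decreasing_by
  have h1 : 0 < (pvConv (I : Int) base).length :=
    pvConv_length_pos _ base hb (Int.natCast_nonneg I)
  rw [pvCat_succ]
  simp only [List.length_append]
  omega

theorem pvGetD_cons_pos (c : Char) (cs : List Char) (w : Int) (hw : 1 ≤ w) :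
    PySem.List.pyGetD (c :: cs) w ' ' = PySem.List.pyGetD cs (w - 1) ' ' := by
  obtain ⟨k, hk⟩ : ∃ k : Nat, w = ((k : Int) + 1) := ⟨(w - 1).toNat, by omega⟩
  subst hk
  have e1 : (k : Int) + 1 = ((k + 1 : Nat) : Int) := by push_cast; ring
  have e2 : (k : Int) + 1 - 1 = ((k : Nat) : Int) := by ring
  rw [e2, PySem.List.pyGetD_natCast]
  rw [e1, PySem.List.pyGetD_natCast]
  simp [List.getD]

-- the selection, as a filter of the absolute position range
theorem pvSel_eq (p m need : Int) :
    ∀ (L : List Char) (pos : Int),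
      pvSel p m need L pos =
        ((PySem.List.pyRange pos (pos + L.length) 1).filter
            (fun j => decide (p - 1 ≤ j ∧ PySem.Int.mod (j - (p - 1)) m = 0 ∧ j < need))).map
          (fun j => PySem.List.pyGetD L (j - pos) ' ') := by
  intro L
  induction L with
  | nil =>
      intro pos
      simp only [List.length_nil, Nat.cast_zero, add_zero]
      rw [PySem.List.pyRange_one_eq_nil (le_refl pos)]
      simp [pvSel]
  | cons c cs ih =>
      intro pos
      have hb1 : pos < pos + ((c :: cs).length : Int) := by
        simp only [List.length_cons]; push_cast; omega
      rw [PySem.List.pyRange_one_cons hb1, List.filter_cons]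
      have hbnd : pos + ((c :: cs).length : Int) = (pos + 1) + (cs.length : Int) := by
        simp only [List.length_cons]; push_cast; ring
      rw [hbnd]
      have htail :
          ((PySem.List.pyRange (pos + 1) ((pos + 1) + (cs.length : Int)) 1).filter
              (fun j => decide (p - 1 ≤ j ∧ PySem.Int.mod (j - (p - 1)) m = 0 ∧ j < need))).map
            (fun j => PySem.List.pyGetD (c :: cs) (j - pos) ' ') =
          pvSel p m need cs (pos + 1) := by
        rw [ih (pos + 1)]
        apply List.map_congr_left
        intro j hj
        have hj' : pos + 1 ≤ j := by
          have := List.mem_of_mem_filter hj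
          rw [PySem.List.mem_pyRange_one] at this
          omega
        rw [pvGetD_cons_pos c cs (j - pos) (by omega)]
        have : j - pos - 1 = j - (pos + 1) := by ring
        rw [this]
      by_cases hc : p - 1 ≤ pos ∧ PySem.Int.mod (pos - (p - 1)) m = 0 ∧ pos < need
      · rw [if_pos (by simpa using hc)]
        simp only [pvSel, hc, List.map_cons, htail]
        have : pos - pos = (0 : Int) := by ring
        rw [this, PySem.List.pyGetD_zero_cons]
        simp
      · rw [if_neg (by simpa using hc)]
        simp only [pvSel, hc, if_false, htail]
        simp

theorem pvFilter_pyRange_single (q : Int → Bool) (a b x : Int) (hax : a ≤ x) (hxb : x < b)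
    (hqx : q x = true) (huniq : ∀ j, a ≤ j → j < b → q j = true → j = x) :
    (PySem.List.pyRange a b 1).filter q = [x] := by
  rw [PySem.List.pyRange_one_cons (by omega : a < b), List.filter_cons]
  by_cases hqa : q a = true
  · have hxa : a = x := huniq a le_rfl (by omega) hqa
    subst hxa
    rw [if_pos hqa]
    have hnil : (PySem.List.pyRange (a + 1) b 1).filter q = [] := by
      rw [List.filter_eq_nil_iff]
      intro j hj
      rw [PySem.List.mem_pyRange_one] at hj
      intro hqj
      have := huniq j (by omega) hj.2 hqj
      omega
    rw [hnil]
  · rw [if_neg hqa]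
    have hxa : x ≠ a := by intro h; rw [h] at hqx; exact hqa hqx
    exact pvFilter_pyRange_single q (a + 1) b x (by omega) hxb hqx
      (fun j hj1 hj2 hqj => huniq j (by omega) hj2 hqj)
termination_by (b - a).toNat
decreasing_by omega

-- the filtered positions below the s-th target are exactly the first s targets
theorem pvIndices_eq (m p t need : Int) (hp : 1 ≤ p) (hpm : p ≤ m) (ht : 1 ≤ t)
    (hneed : need = (p - 1) + m * (t - 1) + 1) :
    ∀ s : Nat, 1 ≤ s → (s : Int) ≤ t →
      (PySem.List.pyRange 0 ((p - 1) + m * ((s : Int) - 1) + 1) 1).filter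
          (fun j => decide (p - 1 ≤ j ∧ PySem.Int.mod (j - (p - 1)) m = 0 ∧ j < need)) =
        (PySem.List.pyRange 0 (s : Int) 1).map (fun k => (p - 1) + m * k) := by
  have hm0 : 0 ≤ m := by omega
  have hmt : 0 ≤ m * (t - 1) := mul_nonneg hm0 (by omega)
  intro s hs1
  induction s, hs1 using Nat.le_induction with
  | base =>
      intro _
      have e1 : (p - 1) + m * (((1 : Nat) : Int) - 1) + 1 = (p - 1) + 1 := by push_cast; ring
      rw [e1]
      have e2 : ((1 : Nat) : Int) = 0 + 1 := by omega
      rw [e2, PySem.List.pyRange_one_singleton]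
      rw [pvFilter_pyRange_single _ 0 ((p - 1) + 1) (p - 1) (by omega) (by omega)
        (by
          apply decide_eq_true
          refine ⟨le_rfl, ?_, ?_⟩
          · rw [sub_self, PySem.Int.mod_eq_zero_iff_dvd]
            exact dvd_zero m
          · omega)
        (fun j h0 hjb hqj => by
          have := of_decide_eq_true hqj
          omega)]
      simp
  | succ s hs ih =>
      intro hst
      have hsInt : ((s + 1 : Nat) : Int) = (s : Int) + 1 := by push_cast; ring
      have hsle : (s : Int) ≤ t := by omega
      have hms : 0 ≤ m * ((s : Int) - 1) := mul_nonneg hm0 (by omega)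
      have hmono : m * ((s : Int) - 1) + 1 ≤ m * (s : Int) := by nlinarith
      have e1 : (p - 1) + m * (((s + 1 : Nat) : Int) - 1) + 1 = (p - 1) + m * (s : Int) + 1 := by
        push_cast; ring
      rw [e1]
      rw [PySem.List.pyRange_one_append 0 ((p - 1) + m * ((s : Int) - 1) + 1)
        ((p - 1) + m * (s : Int) + 1) (by omega) (by omega)]
      rw [List.filter_append, ih hsle]
      have hsingle : (PySem.List.pyRange ((p - 1) + m * ((s : Int) - 1) + 1)
          ((p - 1) + m * (s : Int) + 1) 1).filter
            (fun j => decide (p - 1 ≤ j ∧ PySem.Int.mod (j - (p - 1)) m = 0 ∧ j < need)) =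
          [(p - 1) + m * (s : Int)] := by
        apply pvFilter_pyRange_single _ _ _ _ (by omega) (by omega)
        · apply decide_eq_true
          refine ⟨by omega, ?_, ?_⟩
          · rw [show (p - 1) + m * (s : Int) - (p - 1) = m * (s : Int) from by ring,
              PySem.Int.mod_eq_zero_iff_dvd]
            exact dvd_mul_right m _
          · have : m * (s : Int) ≤ m * (t - 1) :=
              mul_le_mul_of_nonneg_left (by omega) hm0
            omega
        · intro j hj1 hj2 hqj
          obtain ⟨hpj, hmod, hjn⟩ := of_decide_eq_true hqj
          rw [PySem.Int.mod_eq_zero_iff_dvd] at hmod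
          obtain ⟨c, hc⟩ := hmod
          have hc1 : m * ((s : Int) - 1) < m * c := by linarith
          have hc2 : m * c ≤ m * (s : Int) := by linarith
          have hm1 : 0 < m := by omega
          have hcl : (s : Int) - 1 < c := lt_of_mul_lt_mul_left hc1 hm0
          have hcr : c ≤ (s : Int) := le_of_mul_le_mul_left hc2 hm1
          have hcs : c = (s : Int) := by omega
          rw [hcs] at hc
          linarith
      rw [hsingle]
      rw [hsInt, PySem.List.pyRange_one_succ_right (Int.natCast_nonneg s), List.map_append]
      simp

theorem pvGetD_prefix (L1 L2 : List Char) (h : L1 <+: L2) (i : Int) (h0 : 0 ≤ i)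
    (h1 : i < (L1.length : Int)) :
    PySem.List.pyGetD L1 i ' ' = PySem.List.pyGetD L2 i ' ' := by
  have hlen : L1.length ≤ L2.length := h.length_le
  rw [PySem.List.pyGetD_eq_getElem L1 ' ' h0 h1,
    PySem.List.pyGetD_eq_getElem L2 ' ' h0 (by omega)]
  exact List.IsPrefix.getElem h _

-- the two ports agree for t ≥ 1 (the common value: one stream digit per target index)
theorem pv_main (n t m p : Int) (hn2 : 2 ≤ n) (hp1 : 1 ≤ p) (hpm : p ≤ m) (ht1 : 1 ≤ t) :
    pvAnsA (pvBuildA n (t * m) [] 0) t m p [] 1 =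
      pvLoopB n ((p - 1) + m * (t - 1) + 1) m p [] 0 0 := by
  have hm0 : 0 ≤ m := by omega
  have hmt : 0 ≤ m * (t - 1) := mul_nonneg hm0 (by omega)
  have hneedtm : (p - 1) + m * (t - 1) + 1 ≤ t * m := by
    have : t * m = m * (t - 1) + m := by ring
    omega
  -- A's first loop: a stream truncation of length ≥ t*m
  have e0 : pvCat n 0 = [] := rfl
  obtain ⟨JA, hA, hAlen⟩ := pvBuildA_spec n (t * m) hn2 0
  rw [e0] at hA
  have hA0 : ((0 : Nat) : Int) = 0 := rfl
  rw [hA0] at hA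
  -- B's loop: the selection from a stream truncation of length ≥ need
  obtain ⟨JB, hB, hBlen⟩ := pvLoopB_spec n ((p - 1) + m * (t - 1) + 1) m p hn2 0
  rw [e0] at hB
  have hsel0 : pvSel p m ((p - 1) + m * (t - 1) + 1) [] 0 = [] := rfl
  have hlen0 : (([] : List Char).length : Int) = 0 := rfl
  rw [hsel0, hlen0, hA0] at hB
  rw [hA, hB]
  -- A's second loop as a map over the targets
  rw [pvAnsA_spec (pvCat n JA) t m p [] 1 (by simp)]
  have h10 : (1 : Int) - 1 = 0 := by ring
  rw [h10, List.nil_append]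
  -- B's selection as a filtered position range
  rw [pvSel_eq p m ((p - 1) + m * (t - 1) + 1) (pvCat n JB) 0]
  have hbnd : (0 : Int) + ((pvCat n JB).length : Int) = ((pvCat n JB).length : Int) := by ring
  rw [hbnd]
  rw [PySem.List.pyRange_one_append 0 ((p - 1) + m * (t - 1) + 1) ((pvCat n JB).length : Int)
    (by omega) (by omega)]
  rw [List.filter_append]
  have hnil : ((PySem.List.pyRange ((p - 1) + m * (t - 1) + 1) ((pvCat n JB).length : Int) 1).filter
      (fun j => decide (p - 1 ≤ j ∧ PySem.Int.mod (j - (p - 1)) m = 0 ∧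
        j < (p - 1) + m * (t - 1) + 1))) = [] := by
    rw [List.filter_eq_nil_iff]
    intro j hj
    rw [PySem.List.mem_pyRange_one] at hj
    intro hqj
    have := of_decide_eq_true hqj
    omega
  rw [hnil, List.append_nil]
  have hcast : ((t.toNat : Nat) : Int) = t := by omega
  have hidx := pvIndices_eq m p t ((p - 1) + m * (t - 1) + 1) hp1 hpm ht1 rfl t.toNat
    (by omega) (by omega)
  rw [hcast] at hidx
  rw [hidx, List.map_map]
  apply List.map_congr_left
  intro k hk
  rw [PySem.List.mem_pyRange_one] at hk
  have hk0 : 0 ≤ m * k := mul_nonneg hm0 hk.1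
  have hkt : m * k ≤ m * (t - 1) := mul_le_mul_of_nonneg_left (by omega) hm0
  simp only [Function.comp_apply, sub_zero]
  rcases le_total JA JB with hJ | hJ
  · exact pvGetD_prefix _ _ (pvCat_prefix n hJ) _ (by omega) (by omega)
  · exact (pvGetD_prefix _ _ (pvCat_prefix n hJ) _ (by omega) (by omega)).symm

-- ===== VERDICT (by name: the statement is the Claim_ definition above) =====
theorem solution_spec : Claim_equal_solution := by
  intro n t m p hdom hpre
  unfold Spec_solution solution solution_alt
  by_cases ht : t ≤ 0
  · rw [if_pos ht]
    rw [pvAnsA, dif_neg (by simp; omega)]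
  · rcases hpre with ⟨hn2, hn16, hp1, hpm⟩ | ⟨ht0, -⟩
    · rw [if_neg ht]
      rw [pv_main n t m p hn2 hp1 hpm (by omega)]
    · omega
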